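-- pv_equiv track=rewrite | github.com/ayoubzulfiqar/Leeteration | FindtheMaximumDivisibilityScore/find_the_maximum_divisibility_score.py | maxDivisibilityScore
-- ===== SOURCE A (Python) =====
-- def maxDivisibilityScore(nums: list[int], divisors: list[int]) -> int:
--     max_score = -1
--     result_divisor = -1
--
--     for d in divisors:
--         current_score = 0
--         for n in nums:
--             if n % d == 0:
--                 current_score += 1
--
--         if current_score > max_score:
--             max_score = current_score
--             result_divisor = d
--         elif current_score == max_score:
--             if result_divisor == -1 or d < result_divisor:
--                 result_divisor = d
--
--     return result_divisor
-- ===== SOURCE B (Python) =====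
-- def maxDivisibilityScore(nums: list[int], divisors: list[int]) -> int:
--     # Harvest the divisors of every number (sqrt trial division) into a counter,
--     # instead of testing every (number, candidate) pair with %.
--     zeros = 0
--     divcount = {}
--     for n in nums:
--         if n == 0:
--             zeros += 1
--         else:
--             a = -n if n < 0 else n
--             i = 1
--             while i * i <= a:
--                 if a % i == 0:
--                     divcount[i] = divcount.get(i, 0) + 1
--                     j = a // i
--                     if j != i:
--                         divcount[j] = divcount.get(j, 0) + 1
--                 i += 1
--     best = None
--     best_score = -1
--     for d in divisors:
--         s = zeros + divcount.get(d if d > 0 else -d, 0)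
--         if best is None or s > best_score or (s == best_score and d < best):
--             best_score, best = s, d
--     return -1 if best is None else best
-- ===== Notes on version B (the rewrite author's own statement) =====
-- stated objective: faster
-- what changed: B replaces A's per-candidate modulo scan over nums (O(|nums|*|divisors|) pair tests) by a divisor-harvesting pass: for each number it enumerates all divisors of |n| by sqrt trial division into a counter (zeros counted separately), so each candidate's score is a single dictionary lookup in a separate selection pass; A's '-1' sentinel is gone.
-- intended difference: When -1 is itself a divisor, no divisor < -1 divides every number, and the last divisor dividing every number is not -1, A's 'result_divisor == -1' sentinel check misreads the legitimately selected divisor -1 as 'nothing selected yet' and lets a LARGER tied divisor replace it (e.g. nums=[2], divisors=[-1,2]: A returns 2); B returns the smallest maximum-score divisor (-1 there), which is the intended tie-break. — e.g. on maxDivisibilityScore([2], [-1, 2]): A returns 2, B returns -1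
import Mathlib
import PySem

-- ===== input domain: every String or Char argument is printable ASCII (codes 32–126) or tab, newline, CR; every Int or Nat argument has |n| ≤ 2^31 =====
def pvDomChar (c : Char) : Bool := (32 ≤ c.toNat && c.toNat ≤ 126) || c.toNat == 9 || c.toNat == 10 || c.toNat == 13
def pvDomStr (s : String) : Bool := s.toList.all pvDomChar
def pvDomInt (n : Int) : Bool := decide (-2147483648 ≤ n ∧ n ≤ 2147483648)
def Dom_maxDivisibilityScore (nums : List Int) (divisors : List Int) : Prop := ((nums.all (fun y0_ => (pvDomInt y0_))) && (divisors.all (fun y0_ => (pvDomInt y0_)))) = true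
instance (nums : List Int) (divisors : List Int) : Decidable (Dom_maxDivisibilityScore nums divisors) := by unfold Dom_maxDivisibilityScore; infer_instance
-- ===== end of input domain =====

-- B computes scores by harvesting each number's divisors via sqrt trial division into a counter,
-- making each candidate's score a lookup (objective: faster, measured); on the stated corner D_
-- (divisor -1 colliding with A's -1 sentinel) B returns the intended smallest tied divisor.


-- ===== PORT A =====
def maxDivisibilityScore (nums : List Int) (divisors : List Int) : Int :=
  (divisors.foldl (fun (st : Int × Int) d =>
      let currentScore : Int :=
        nums.foldl (fun c n => if PySem.Int.mod n d = 0 then c + 1 else c) 0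
      if currentScore > st.1 then (currentScore, d)
      else if currentScore = st.1 then
        (if st.2 = -1 ∨ d < st.2 then (st.1, d) else st)
      else st)
    ((-1 : Int), (-1 : Int))).2

-- ===== PORT B =====
-- B's inner 'while i * i <= a' loop harvesting the divisors of a into the counter dc
-- (the Nat fuel a.toNat + 1 only makes the recursion total: the loop runs at most a times).
def pvAddDivsF : Nat → Int → Int → PySem.Dict Int Int → PySem.Dict Int Int
  | 0, _, _, dc => dc
  | f+1, a, i, dc =>
      if i * i ≤ a then
        let dc' :=
          if PySem.Int.mod a i = 0 then
            let dc1 := dc.insert i (dc.getD i 0 + 1)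
            let j := PySem.Int.floordiv a i
            if j ≠ i then dc1.insert j (dc1.getD j 0 + 1) else dc1
          else dc
        pvAddDivsF f a (i+1) dc'
      else dc

-- B: count zeros and harvest the divisors of every |n| into divcount; then one lookup pass:
-- best = None; for d: s = zeros + divcount.get(|d|, 0); update on 'first or better or tied-smaller'.
def maxDivisibilityScore_alt (nums : List Int) (divisors : List Int) : Int :=
  let st := nums.foldl (fun (st : Int × PySem.Dict Int Int) n =>
      if n = 0 then (st.1 + 1, st.2)
      else
        let a := if n < 0 then -n else n
        (st.1, pvAddDivsF (a.toNat + 1) a 1 st.2))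
    ((0 : Int), (PySem.Dict.empty : PySem.Dict Int Int))
  let sel := divisors.foldl (fun (bs : Int × Option Int) d =>
      let s := st.1 + st.2.getD (if 0 < d then d else -d) 0
      match bs.2 with
      | none => (s, some d)
      | some b => if s > bs.1 ∨ (s = bs.1 ∧ d < b) then (s, some d) else bs)
    ((-1 : Int), (none : Option Int))
  match sel.2 with
  | none => -1
  | some b => b

-- ===== PRECONDITION & SPEC =====
-- Pre_ excludes divisor 0, on which Python A raises ZeroDivisionError.
def Pre_maxDivisibilityScore (nums : List Int) (divisors : List Int) : Prop :=
  (0 : Int) ∉ divisors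
instance (nums : List Int) (divisors : List Int) : Decidable (Pre_maxDivisibilityScore nums divisors) := by
  unfold Pre_maxDivisibilityScore; infer_instance
def pvWitness_maxDivisibilityScore : List Int × List Int := ([6], [2, 3])

-- When -1 is itself a divisor, no divisor < -1 divides every number, and the last divisor dividing
-- every number is not -1, A's 'result_divisor == -1' sentinel misreads the selected divisor -1 as
-- 'nothing yet' and lets a larger tied divisor replace it; B returns the smallest maximum-score
-- divisor, the intended tie-break.
def D_maxDivisibilityScore (nums : List Int) (divisors : List Int) : Prop :=
  let full := divisors.filter fun d => decide (∀ n ∈ nums, d ∣ n)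
  full.min? = some (-1) ∧ full.getLast? ≠ some (-1)
instance (nums : List Int) (divisors : List Int) : Decidable (D_maxDivisibilityScore nums divisors) := by
  unfold D_maxDivisibilityScore; infer_instance

def Spec_maxDivisibilityScore (nums : List Int) (divisors : List Int) (out : Int) : Prop :=
  ¬ D_maxDivisibilityScore nums divisors → out = maxDivisibilityScore_alt nums divisors
instance (nums : List Int) (divisors : List Int) (out : Int) : Decidable (Spec_maxDivisibilityScore nums divisors out) := by
  unfold Spec_maxDivisibilityScore; infer_instance

def pvDiffWitness_maxDivisibilityScore : List Int × List Int := ([2], [-1, 2])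
def pvDiffWitnessOut_maxDivisibilityScore : Int × Int := (2, -1)

-- ===== CLAIM (what is proved, stated in full; the proofs are below) =====
def Claim_unchanged_maxDivisibilityScore : Prop := ∀ (nums : List Int) (divisors : List Int), Dom_maxDivisibilityScore nums divisors → Pre_maxDivisibilityScore nums divisors → Spec_maxDivisibilityScore nums divisors (maxDivisibilityScore nums divisors)
def Claim_changed_maxDivisibilityScore : Prop := Dom_maxDivisibilityScore (pvDiffWitness_maxDivisibilityScore.1) (pvDiffWitness_maxDivisibilityScore.2) ∧ Pre_maxDivisibilityScore (pvDiffWitness_maxDivisibilityScore.1) (pvDiffWitness_maxDivisibilityScore.2) ∧ D_maxDivisibilityScore (pvDiffWitness_maxDivisibilityScore.1) (pvDiffWitness_maxDivisibilityScore.2) ∧ maxDivisibilityScore (pvDiffWitness_maxDivisibilityScore.1) (pvDiffWitness_maxDivisibilityScore.2) = pvDiffWitnessOut_maxDivisibilityScore.1 ∧ maxDivisibilityScore_alt (pvDiffWitness_maxDivisibilityScore.1) (pvDiffWitness_maxDivisibilityScore.2) = pvDiffWitnessOut_maxDivisibilityScore.2 ∧ pvDiffWitnessOut_maxDivisibilityScore.1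 ≠ pvDiffWitnessOut_maxDivisibilityScore.2
def Claim_exact_maxDivisibilityScore : Prop := ∀ (nums : List Int) (divisors : List Int), Dom_maxDivisibilityScore nums divisors → Pre_maxDivisibilityScore nums divisors → D_maxDivisibilityScore nums divisors → maxDivisibilityScore nums divisors ≠ maxDivisibilityScore_alt nums divisors

-- ===== LEMMAS AND PROOFS =====

-- the score of a divisor, the common currency of both ports
def pvSc (nums : List Int) (d : Int) : Int :=
  ((nums.countP (fun n => decide (PySem.Int.mod n d = 0)) : Nat) : Int)
def pvN (nums : List Int) : Int := (nums.length : Int)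

def pvStepA (nums : List Int) (st : Int × Int) (d : Int) : Int × Int :=
  if pvSc nums d > st.1 then (pvSc nums d, d)
  else if pvSc nums d = st.1 then
    (if st.2 = -1 ∨ d < st.2 then (st.1, d) else st)
  else st

def pvStepB (nums : List Int) (b d : Int) : Int :=
  if pvSc nums b < pvSc nums d ∨ (pvSc nums b = pvSc nums d ∧ -b < -d) then d else b

-- the coupling invariant between A's state (ms, rd) and B's running best b
def pvInv (nums : List Int) (ms rd b : Int) : Prop :=
  ms = pvSc nums b ∧ pvSc nums rd = ms ∧ (rd = b ∨ (b = -1 ∧ -1 < rd))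

-- how many times the harvesting loop, entered at index i, emits the key k (closed form)
def pvEc (a i k : Int) : Int :=
  (if k ∣ a ∧ i ≤ k ∧ k * k ≤ a then 1 else 0) +
  (if k ∣ a ∧ k * i ≤ a ∧ a < k * k then 1 else 0)

-- B's first pass (zeros count, divisor counter)
def pvHarvest (nums : List Int) : Int × PySem.Dict Int Int :=
  nums.foldl (fun (st : Int × PySem.Dict Int Int) n =>
      if n = 0 then (st.1 + 1, st.2)
      else
        let a := if n < 0 then -n else n
        (st.1, pvAddDivsF (a.toNat + 1) a 1 st.2))
    ((0 : Int), (PySem.Dict.empty : PySem.Dict Int Int))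

-- B's score of a candidate d: zeros + divcount.get(|d|, 0)
def pvS (nums : List Int) (d : Int) : Int :=
  (pvHarvest nums).1 + (pvHarvest nums).2.getD (if 0 < d then d else -d) 0

theorem pvSc_nonneg (nums : List Int) (d : Int) : 0 ≤ pvSc nums d := by
  simp [pvSc]

theorem pvSc_le (nums : List Int) (d : Int) : pvSc nums d ≤ pvN nums := by
  simp only [pvSc, pvN]
  exact_mod_cast List.countP_le_length

theorem pvSc_eq_N_iff (nums : List Int) (d : Int) :
    pvSc nums d = pvN nums ↔ ∀ n ∈ nums, d ∣ n := by
  simp only [pvSc, pvN, Nat.cast_inj, List.countP_eq_length]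
  constructor
  · intro h n hn; have := h n hn; simpa [PySem.Int.mod_eq_zero_iff_dvd] using this
  · intro h n hn; simpa [PySem.Int.mod_eq_zero_iff_dvd] using h n hn

theorem pvSc_neg_one (nums : List Int) : pvSc nums (-1) = pvN nums := by
  rw [pvSc_eq_N_iff]; intro n _; exact (neg_dvd).mpr (one_dvd n)

-- the Bool predicate of D_'s filter agrees with full score
theorem pred_iff (nums : List Int) (d : Int) :
    ((decide (∀ n ∈ nums, d ∣ n)) = true) ↔ pvSc nums d = pvN nums := by
  rw [pvSc_eq_N_iff]; simp

theorem nofull_of_filter_nil (nums : List Int) (v : List Int)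
    (hvnil : v.filter (fun d => decide (∀ n ∈ nums, d ∣ n)) = []) :
    ∀ d ∈ v, pvSc nums d ≠ pvN nums := by
  intro d hd hsc
  have hmem : d ∈ v.filter (fun d => decide (∀ n ∈ nums, d ∣ n)) :=
    List.mem_filter.mpr ⟨hd, (pred_iff nums d).mpr hsc⟩
  rw [hvnil] at hmem
  simp at hmem

-- ---- port A reduces to the fold of pvStepA ----
theorem portA_eq (nums divisors : List Int) :
    maxDivisibilityScore nums divisors = (divisors.foldl (pvStepA nums) ((-1 : Int), (-1 : Int))).2 := by
  have hf : (fun (st : Int × Int) d =>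
      let currentScore : Int :=
        nums.foldl (fun c n => if PySem.Int.mod n d = 0 then c + 1 else c) 0
      if currentScore > st.1 then (currentScore, d)
      else if currentScore = st.1 then
        (if st.2 = -1 ∨ d < st.2 then (st.1, d) else st)
      else st) = pvStepA nums := by
    funext st d
    have h : nums.foldl (fun c n => if PySem.Int.mod n d = 0 then c + 1 else c) 0 = pvSc nums d := by
      have := PySem.List.foldl_count_if (fun n => decide (PySem.Int.mod n d = 0)) nums 0
      simpa [pvSc] using this
    simp only [pvStepA, h]
  unfold maxDivisibilityScore
  rw [hf]

-- ---- pvEc: base and step facts ----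
theorem pvEc_zero (a i k : Int) (ha : 1 ≤ a) (hi : 1 ≤ i) (hk : 1 ≤ k) (hg : a < i * i) :
    pvEc a i k = 0 := by
  unfold pvEc
  rw [if_neg (by rintro ⟨-, h2, h3⟩; nlinarith), if_neg (by rintro ⟨-, h2, h3⟩; nlinarith)]
  norm_num
theorem pvEc_step_nd (a i k : Int) (ha : 1 ≤ a) (hi : 1 ≤ i) (hk : 1 ≤ k)
    (hnd : ¬ i ∣ a) : pvEc a i k = pvEc a (i+1) k := by
  unfold pvEc
  by_cases hka : k ∣ a
  · obtain ⟨c, hc⟩ := hka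
    have hki : k ≠ i := fun h => hnd (h ▸ ⟨c, hc⟩)
    have h1 : (k ∣ a ∧ i ≤ k ∧ k * k ≤ a) ↔ (k ∣ a ∧ i + 1 ≤ k ∧ k * k ≤ a) := by
      constructor
      · rintro ⟨hd, h2, h3⟩; exact ⟨hd, by omega, h3⟩
      · rintro ⟨hd, h2, h3⟩; exact ⟨hd, by omega, h3⟩
    have h2 : (k ∣ a ∧ k * i ≤ a ∧ a < k * k) ↔ (k ∣ a ∧ k * (i + 1) ≤ a ∧ a < k * k) := by
      constructor
      · rintro ⟨hd, h2, h3⟩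
        refine ⟨hd, ?_, h3⟩
        by_contra hlt
        push_neg at hlt
        have hci : c = i := by nlinarith
        exact hnd ⟨k, by rw [hc, hci]; ring⟩
      · rintro ⟨hd, h2, h3⟩; refine ⟨hd, by nlinarith, h3⟩
    rw [if_congr h1 rfl rfl, if_congr h2 rfl rfl]
  · rw [if_neg (fun h => hka h.1), if_neg (fun h => hka h.1),
      if_neg (fun h => hka h.1), if_neg (fun h => hka h.1)]
theorem pvEc_step_d (a i k : Int) (ha : 1 ≤ a) (hi : 1 ≤ i) (hk : 1 ≤ k)
    (hd : i ∣ a) (hg : i * i ≤ a) :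
    pvEc a i k = (if k = i then 1 else 0) + (if k = a / i ∧ a / i ≠ i then 1 else 0)
      + pvEc a (i+1) k := by
  obtain ⟨j, hj⟩ := hd
  have hj' : a / i = j := by rw [hj]; exact Int.mul_ediv_cancel_left j (by omega)
  have hj1 : 1 ≤ j := by nlinarith
  have hij : i ≤ j := by nlinarith
  rw [hj']
  unfold pvEc
  by_cases hki : k = i
  · -- k = i: LHS term1 fires; everything else is 0
    have e1 : (if k ∣ a ∧ i ≤ k ∧ k * k ≤ a then (1:Int) else 0) = 1 :=
      if_pos ⟨hki ▸ ⟨j, hj⟩, le_of_eq hki.symm, by rw [hki]; exact hg⟩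
    have e2 : (if k ∣ a ∧ k * i ≤ a ∧ a < k * k then (1:Int) else 0) = 0 :=
      if_neg (by rintro ⟨-, h2, h3⟩; rw [hki] at h2 h3; omega)
    have e3 : (if k = i then (1:Int) else 0) = 1 := if_pos hki
    have e4 : (if k = j ∧ j ≠ i then (1:Int) else 0) = 0 :=
      if_neg (by rintro ⟨h1, h2⟩; exact h2 (by rw [← h1, hki]))
    have e5 : (if k ∣ a ∧ i + 1 ≤ k ∧ k * k ≤ a then (1:Int) else 0) = 0 :=
      if_neg (by rintro ⟨-, h2, -⟩; omega)
    have e6 : (if k ∣ a ∧ k * (i + 1) ≤ a ∧ a < k * k then (1:Int) else 0) = 0 :=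
      if_neg (by rintro ⟨-, -, h3⟩; rw [hki] at h3; omega)
    rw [e1, e2, e3, e4, e5, e6]; norm_num
  · by_cases hkj : k = j
    · subst hkj
      have hilt : i < k := lt_of_le_of_ne hij (Ne.symm hki)
      have hkd : k ∣ a := ⟨i, by rw [hj]; ring⟩
      have e1 : (if k ∣ a ∧ i ≤ k ∧ k * k ≤ a then (1:Int) else 0) = 0 :=
        if_neg (by rintro ⟨-, -, h3⟩; nlinarith)
      have e2 : (if k ∣ a ∧ k * i ≤ a ∧ a < k * k then (1:Int) else 0) = 1 :=
        if_pos ⟨hkd, by nlinarith, by nlinarith⟩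
      have e3 : (if k = i then (1:Int) else 0) = 0 := if_neg hki
      have e4 : (if k = k ∧ k ≠ i then (1:Int) else 0) = 1 := if_pos ⟨rfl, hki⟩
      have e5 : (if k ∣ a ∧ i + 1 ≤ k ∧ k * k ≤ a then (1:Int) else 0) = 0 :=
        if_neg (by rintro ⟨-, -, h3⟩; nlinarith)
      have e6 : (if k ∣ a ∧ k * (i + 1) ≤ a ∧ a < k * k then (1:Int) else 0) = 0 :=
        if_neg (by rintro ⟨-, h2, -⟩; nlinarith)
      rw [e1, e2, e3, e4, e5, e6]; norm_num
    · have h1 : (k ∣ a ∧ i ≤ k ∧ k * k ≤ a) ↔ (k ∣ a ∧ i + 1 ≤ k ∧ k * k ≤ a) := by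
        constructor
        · rintro ⟨hdk, h2, h3⟩; exact ⟨hdk, by omega, h3⟩
        · rintro ⟨hdk, h2, h3⟩; exact ⟨hdk, by omega, h3⟩
      have h2 : (k ∣ a ∧ k * i ≤ a ∧ a < k * k) ↔ (k ∣ a ∧ k * (i + 1) ≤ a ∧ a < k * k) := by
        constructor
        · rintro ⟨hdk, h2, h3⟩
          refine ⟨hdk, ?_, h3⟩
          obtain ⟨c, hc⟩ := hdk
          by_contra hlt
          push_neg at hlt
          have hci : c = i := by nlinarith
          have hkj2 : i * j = k * i := by rw [← hj, hc, hci]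
          have : k = j := by nlinarith
          exact hkj this
        · rintro ⟨hdk, h2, h3⟩; exact ⟨hdk, by nlinarith, h3⟩
      have e3 : (if k = i then (1:Int) else 0) = 0 := if_neg hki
      have e4 : (if k = j ∧ j ≠ i then (1:Int) else 0) = 0 :=
        if_neg (by rintro ⟨h, -⟩; exact hkj h)
      rw [if_congr h1 rfl rfl, if_congr h2 rfl rfl, e3, e4]; norm_num
theorem pvEc_one (a k : Int) (ha : 1 ≤ a) (hk : 1 ≤ k) :
    pvEc a 1 k = if k ∣ a then 1 else 0 := by
  unfold pvEc
  by_cases hka : k ∣ a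
  · have hle : k ≤ a := Int.le_of_dvd (by omega) hka
    by_cases hkk : k * k ≤ a
    · rw [if_pos ⟨hka, hk, hkk⟩, if_neg (by rintro ⟨-, -, h⟩; omega), if_pos hka]
      norm_num
    · rw [if_neg (by rintro ⟨-, -, h⟩; omega), if_pos ⟨hka, by omega, by omega⟩, if_pos hka]
      norm_num
  · rw [if_neg (fun h => hka h.1), if_neg (fun h => hka h.1), if_neg hka]
    norm_num
theorem addDivsF_getD (f : Nat) : ∀ (a i : Int) (dc : PySem.Dict Int Int) (k : Int),
    1 ≤ a → 1 ≤ i → 1 ≤ k → a - i < (f : Int) →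
    (pvAddDivsF f a i dc).getD k 0 = dc.getD k 0 + pvEc a i k := by
  induction f with
  | zero =>
      intro a i dc k ha hi hk hf
      push_cast at hf
      have hii : 0 ≤ i * (i - 1) := mul_nonneg (by omega) (by omega)
      have hlt : a < i * i := by nlinarith
      rw [pvAddDivsF, pvEc_zero a i k ha hi hk hlt, add_zero]
  | succ f ih =>
      intro a i dc k ha hi hk hf
      push_cast at hf
      rw [pvAddDivsF]
      by_cases hg : i * i ≤ a
      · rw [if_pos hg]
        by_cases hmod : PySem.Int.mod a i = 0
        · have hdvd : i ∣ a := (PySem.Int.mod_eq_zero_iff_dvd a i).mp hmod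
          have hjd : PySem.Int.floordiv a i = a / i :=
            PySem.Int.floordiv_eq_ediv_of_pos (by omega)
          simp only [hmod, hjd, if_pos]
          by_cases hji : a / i ≠ i
          · rw [if_pos hji, ih a (i+1) _ k ha (by omega) hk (by push_cast; omega),
              pvEc_step_d a i k ha hi hk hdvd hg]
            have hgd : ((dc.insert i (dc.getD i 0 + 1)).insert (a / i)
                  ((dc.insert i (dc.getD i 0 + 1)).getD (a / i) 0 + 1)).getD k 0
                = dc.getD k 0 + (if k = i then 1 else 0) + (if k = a / i then 1 else 0) := by
              simp only [PySem.Dict.getD_insert]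
              by_cases hk1 : k = a / i
              · subst hk1
                simp [hji]
              · by_cases hk2 : k = i
                · subst hk2
                  simp [hk1]
                · simp [hk1, hk2]
            rw [hgd]
            have he : (if k = a / i ∧ a / i ≠ i then (1 : Int) else 0)
                = (if k = a / i then 1 else 0) := by simp [hji]
            rw [he]
            ring
          · rw [if_neg hji, ih a (i+1) _ k ha (by omega) hk (by push_cast; omega),
              pvEc_step_d a i k ha hi hk hdvd hg]
            have hgd : (dc.insert i (dc.getD i 0 + 1)).getD k 0
                = dc.getD k 0 + (if k = i then 1 else 0) := by
              simp only [PySem.Dict.getD_insert]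
              by_cases hk2 : k = i
              · subst hk2; simp
              · simp [hk2]
            rw [hgd]
            have he : (if k = a / i ∧ a / i ≠ i then (1 : Int) else 0) = 0 := by
              simp only [ne_eq, not_not] at hji
              simp [hji]
            rw [he]
            ring
        · rw [if_neg hmod, ih a (i+1) dc k ha (by omega) hk (by push_cast; omega),
            pvEc_step_nd a i k ha hi hk
              (fun h => hmod ((PySem.Int.mod_eq_zero_iff_dvd a i).mpr h))]
      · rw [if_neg hg]
        rw [pvEc_zero a i k ha hi hk (by omega), add_zero]

theorem harvest_getD (k : Int) (hk : 1 ≤ k) : ∀ (nums : List Int) (z : Int) (dc : PySem.Dict Int Int),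
    (nums.foldl (fun (st : Int × PySem.Dict Int Int) n =>
        if n = 0 then (st.1 + 1, st.2)
        else
          let a := if n < 0 then -n else n
          (st.1, pvAddDivsF (a.toNat + 1) a 1 st.2)) (z, dc)).1
    + (nums.foldl (fun (st : Int × PySem.Dict Int Int) n =>
        if n = 0 then (st.1 + 1, st.2)
        else
          let a := if n < 0 then -n else n
          (st.1, pvAddDivsF (a.toNat + 1) a 1 st.2)) (z, dc)).2.getD k 0
    = z + dc.getD k 0 + ((nums.countP (fun n => decide (k ∣ n)) : Nat) : Int) := by
  intro nums
  induction nums with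
  | nil => intro z dc; simp
  | cons n rest ih =>
      intro z dc
      simp only [List.foldl_cons, List.countP_cons]
      by_cases hn : n = 0
      · subst hn
        rw [if_pos rfl]
        rw [ih (z+1) dc]
        have h0 : (k ∣ (0:Int)) := dvd_zero k
        simp only [h0, decide_true, if_true]
        push_cast
        ring
      · rw [if_neg hn]
        have ha : 1 ≤ (if n < 0 then -n else n) := by split_ifs <;> omega
        set a := if n < 0 then -n else n with hadef
        rw [ih z (pvAddDivsF (a.toNat + 1) a 1 dc)]
        rw [addDivsF_getD (a.toNat + 1) a 1 dc k ha (by omega) hk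
          (by push_cast; omega)]
        rw [pvEc_one a k ha hk]
        have hdvd : (k ∣ a) ↔ (k ∣ n) := by
          rw [hadef]; split_ifs with h
          · exact dvd_neg
          · exact Iff.rfl
        by_cases hkn : k ∣ n
        · rw [if_pos (hdvd.mpr hkn)]
          simp only [hkn, decide_true, if_true]
          push_cast
          ring
        · rw [if_neg (fun h => hkn (hdvd.mp h))]
          simp only [hkn, decide_false, if_false]
          push_cast
          ring

-- pvSc is the number of multiples of d
theorem pvSc_eq_countP_dvd (nums : List Int) (d : Int) :
    pvSc nums d = ((nums.countP (fun n => decide (d ∣ n)) : Nat) : Int) := by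
  unfold pvSc
  congr 1
  apply List.countP_congr
  intro n _
  simp [PySem.Int.mod_eq_zero_iff_dvd]

-- B's table score agrees with the modulo score on every nonzero candidate
theorem pvS_eq (nums : List Int) (d : Int) (hd : d ≠ 0) : pvS nums d = pvSc nums d := by
  have hk : 1 ≤ (if 0 < d then d else -d) := by split_ifs <;> omega
  unfold pvS pvHarvest
  rw [harvest_getD _ hk nums 0 PySem.Dict.empty]
  have hdvd : ∀ n, ((if 0 < d then d else -d) ∣ n) ↔ (d ∣ n) := by
    intro n; split_ifs with h
    · exact Iff.rfl
    · exact neg_dvd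
  rw [pvSc_eq_countP_dvd nums d]
  have : (nums.countP (fun n => decide ((if 0 < d then d else -d) ∣ n)))
      = nums.countP (fun n => decide (d ∣ n)) := by
    apply List.countP_congr
    intro n _
    simp [hdvd n]
  rw [this]
  simp

-- ---- the selection pass reduces to the fold of pvStepB ----
theorem sel_fold (nums : List Int) (S : Int → Int) :
    ∀ (ds : List Int) (b : Int), (∀ d ∈ ds, S d = pvSc nums d) →
    ds.foldl (fun (bs : Int × Option Int) d =>
        match bs.2 with
        | none => (S d, some d)
        | some b' => if S d > bs.1 ∨ (S d = bs.1 ∧ d < b') then (S d, some d) else bs)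
      (pvSc nums b, some b)
    = (pvSc nums (ds.foldl (pvStepB nums) b), some (ds.foldl (pvStepB nums) b)) := by
  intro ds
  induction ds with
  | nil => intro b _; rfl
  | cons d r ih =>
      intro b hS
      have hSd : S d = pvSc nums d := hS d List.mem_cons_self
      simp only [List.foldl_cons]
      have hcond : (S d > pvSc nums b ∨ (S d = pvSc nums b ∧ d < b)) ↔
          (pvSc nums b < pvSc nums d ∨ (pvSc nums b = pvSc nums d ∧ -b < -d)) := by
        rw [hSd]
        constructor
        · rintro (h | ⟨h1, h2⟩)
          · exact Or.inl h
          · exact Or.inr ⟨h1.symm, by omega⟩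
        · rintro (h | ⟨h1, h2⟩)
          · exact Or.inl h
          · exact Or.inr ⟨h1.symm, by omega⟩
      have hstep : (if S d > pvSc nums b ∨ (S d = pvSc nums b ∧ d < b)
          then (S d, some d) else ((pvSc nums b : Int), (some b : Option Int)))
          = (pvSc nums (pvStepB nums b d), some (pvStepB nums b d)) := by
        simp only [pvStepB]
        by_cases hc : pvSc nums b < pvSc nums d ∨ (pvSc nums b = pvSc nums d ∧ -b < -d)
        · rw [if_pos hc, if_pos (hcond.mpr hc), hSd]
        · rw [if_neg hc, if_neg (fun h => hc (hcond.mp h))]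
      rw [hstep]
      exact ih (pvStepB nums b d) (fun x hx => hS x (List.mem_cons_of_mem _ hx))

-- ---- port B reduces to the fold of pvStepB (divisors all nonzero) ----
theorem portB_eq (nums divisors : List Int) (hpre : (0 : Int) ∉ divisors) :
    maxDivisibilityScore_alt nums divisors =
      (match divisors with
       | [] => (-1 : Int)
       | d0 :: rest => rest.foldl (pvStepB nums) d0) := by
  have halt : maxDivisibilityScore_alt nums divisors =
      (match (divisors.foldl (fun (bs : Int × Option Int) d =>
          match bs.2 with
          | none => (pvS nums d, some d)
          | some b => if pvS nums d > bs.1 ∨ (pvS nums d = bs.1 ∧ d < b)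
              then (pvS nums d, some d) else bs)
        ((-1 : Int), (none : Option Int))).2 with
       | none => (-1 : Int) | some b => b) := rfl
  rw [halt]
  cases divisors with
  | nil => rfl
  | cons d0 rest =>
      simp only [List.foldl_cons]
      have hS0 : pvS nums d0 = pvSc nums d0 :=
        pvS_eq nums d0 (fun h => hpre (h ▸ List.mem_cons_self))
      have hfold := sel_fold nums (pvS nums) rest d0
        (fun d hd => pvS_eq nums d (fun h => hpre (h ▸ List.mem_cons_of_mem _ hd)))
      rw [hS0, hfold]

-- ---- characterisation of B's selection fold ----
theorem runB_mem (nums : List Int) :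
    ∀ (ds : List Int) (b : Int), ds.foldl (pvStepB nums) b = b ∨ ds.foldl (pvStepB nums) b ∈ ds := by
  intro ds
  induction ds with
  | nil => intro b; simp
  | cons d rest ih =>
      intro b
      simp only [List.foldl_cons]
      rcases ih (pvStepB nums b d) with h | h
      · rw [h]; unfold pvStepB; split_ifs with hc
        · exact Or.inr List.mem_cons_self
        · exact Or.inl rfl
      · exact Or.inr (List.mem_cons_of_mem _ h)

theorem runB_isMax (nums : List Int) :
    ∀ (ds : List Int) (b : Int), ∀ d, (d = b ∨ d ∈ ds) →
      (pvSc nums d < pvSc nums (ds.foldl (pvStepB nums) b) ∨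
       (pvSc nums d = pvSc nums (ds.foldl (pvStepB nums) b) ∧ ds.foldl (pvStepB nums) b ≤ d)) := by
  intro ds
  induction ds with
  | nil =>
      intro b d hd
      rcases hd with h | h
      · subst h; simp
      · simp at h
  | cons x rest ih =>
      intro b d hd
      simp only [List.foldl_cons]
      have step : ∀ y, (y = b ∨ y = x) →
          (pvSc nums y < pvSc nums (pvStepB nums b x) ∨
           (pvSc nums y = pvSc nums (pvStepB nums b x) ∧ pvStepB nums b x ≤ y)) := by
        intro y hy
        unfold pvStepB
        split_ifs with hc
        · rcases hy with h | h <;> subst h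
          · rcases hc with h1 | h1
            · exact Or.inl h1
            · exact Or.inr ⟨h1.1, by omega⟩
          · exact Or.inr ⟨rfl, le_refl _⟩
        · push_neg at hc
          rcases hy with h | h <;> subst h
          · exact Or.inr ⟨rfl, le_refl _⟩
          · rcases lt_or_ge (pvSc nums y) (pvSc nums b) with h1 | h1
            · exact Or.inl h1
            · have h2 : pvSc nums b = pvSc nums y := le_antisymm h1 hc.1
              exact Or.inr ⟨h2.symm, by have := hc.2 h2; omega⟩
      rcases hd with h | h
      · have h1 := step d (Or.inl h)
        have h2 := ih (pvStepB nums b x) (pvStepB nums b x) (Or.inl rfl)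
        rcases h1 with h1 | h1 <;> rcases h2 with h2 | h2
        · exact Or.inl (by omega)
        · exact Or.inl (by omega)
        · exact Or.inl (by omega)
        · exact Or.inr ⟨by omega, by omega⟩
      · rcases List.mem_cons.mp h with h' | h'
        · have h1 := step d (Or.inr h')
          have h2 := ih (pvStepB nums b x) (pvStepB nums b x) (Or.inl rfl)
          rcases h1 with h1 | h1 <;> rcases h2 with h2 | h2
          · exact Or.inl (by omega)
          · exact Or.inl (by omega)
          · exact Or.inl (by omega)
          · exact Or.inr ⟨by omega, by omega⟩
        · exact ih (pvStepB nums b x) d (Or.inr h')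

-- ---- the invariant is preserved ----
theorem inv_step (nums : List Int) (ms rd b d : Int) (h : pvInv nums ms rd b) :
    pvInv nums (pvStepA nums (ms, rd) d).1 (pvStepA nums (ms, rd) d).2 (pvStepB nums b d) := by
  obtain ⟨h1, h2, h3⟩ := h
  have hdN := pvSc_le nums d
  have hbN := pvSc_le nums b
  have hrdN := pvSc_le nums rd
  have hneg := pvSc_neg_one nums
  unfold pvStepA pvStepB pvInv
  dsimp only
  rcases h3 with hs | ⟨hb, hrd⟩
  · subst hs
    split_ifs <;> dsimp only <;> omega
  · subst hb
    split_ifs <;> dsimp only <;> omega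

theorem inv_run (nums : List Int) :
    ∀ (ds : List Int) (ms rd b : Int), pvInv nums ms rd b →
      pvInv nums (ds.foldl (pvStepA nums) (ms, rd)).1 (ds.foldl (pvStepA nums) (ms, rd)).2
        (ds.foldl (pvStepB nums) b) := by
  intro ds
  induction ds with
  | nil => intro ms rd b h; simpa using h
  | cons x rest ih =>
      intro ms rd b h
      simp only [List.foldl_cons]
      have hstep := inv_step nums ms rd b x h
      have := ih (pvStepA nums (ms, rd) x).1 (pvStepA nums (ms, rd) x).2 (pvStepB nums b x) hstep
      simpa using this

-- pvStepA on an explicit state pair, stated without projections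
theorem stepA_eq (nums : List Int) (ms rd d : Int) :
    pvStepA nums (ms, rd) d =
      if pvSc nums d > ms then (pvSc nums d, d)
      else if pvSc nums d = ms then (if rd = -1 ∨ d < rd then (ms, d) else (ms, rd))
      else (ms, rd) := rfl

-- ---- folds over a stretch with no full-score divisor do nothing ----
theorem runA_nofull (nums : List Int) :
    ∀ (ds : List Int) (rd : Int), (∀ d ∈ ds, pvSc nums d ≠ pvN nums) →
      ds.foldl (pvStepA nums) (pvN nums, rd) = (pvN nums, rd) := by
  intro ds
  induction ds with
  | nil => intro rd _; rfl
  | cons x rest ih =>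
      intro rd h
      have hx : pvSc nums x ≠ pvN nums := h x List.mem_cons_self
      have hle := pvSc_le nums x
      simp only [List.foldl_cons]
      have hkeep : pvStepA nums (pvN nums, rd) x = (pvN nums, rd) := by
        have hgt : ¬ pvSc nums x > pvN nums := by omega
        rw [stepA_eq, if_neg hgt, if_neg hx]
      rw [hkeep]
      exact ih rd (fun d hd => h d (List.mem_cons_of_mem _ hd))

theorem runB_nofull (nums : List Int) :
    ∀ (ds : List Int), (∀ d ∈ ds, pvSc nums d ≠ pvN nums) →
      ds.foldl (pvStepB nums) (-1) = -1 := by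
  intro ds
  induction ds with
  | nil => intro _; rfl
  | cons x rest ih =>
      intro h
      have hx : pvSc nums x ≠ pvN nums := h x List.mem_cons_self
      have hle := pvSc_le nums x
      have hneg := pvSc_neg_one nums
      simp only [List.foldl_cons]
      have hkeep : pvStepB nums (-1) x = -1 := by
        unfold pvStepB; split_ifs with h1
        · rcases h1 with h1 | h1 <;> omega
        · rfl
      rw [hkeep]
      exact ih (fun d hd => h d (List.mem_cons_of_mem _ hd))

-- ---- both folds resynchronise at a -1 that still has maximal score ----
theorem step_neg_one (nums : List Int) (ms rd b : Int) (h : pvInv nums ms rd b)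
    (hb : pvSc nums b = pvN nums → (-1 : Int) ≤ b) :
    pvStepA nums (ms, rd) (-1) = (pvN nums, -1) ∧ pvStepB nums b (-1) = -1 := by
  obtain ⟨h1, h2, h3⟩ := h
  have hbN := pvSc_le nums b
  have hneg := pvSc_neg_one nums
  constructor
  · unfold pvStepA; dsimp only
    split_ifs with c1 c2 c3
    · rw [hneg]
    · rw [hneg] at c2; rw [← c2]
    · exfalso
      have hrd : rd < -1 := by omega
      rcases h3 with hs | ⟨hb1, hrd1⟩
      · have hfull : pvSc nums b = pvN nums := by omega
        have := hb hfull
        omega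
      · omega
    · exfalso; omega
  · unfold pvStepB
    split_ifs with c1
    · rfl
    · have hsb : pvSc nums b = pvN nums := by omega
      have := hb hsb
      omega

-- the A-fold and B-fold over u ++ -1 :: v both end at -1 when v has no full-score divisor
theorem run_sync (nums : List Int) :
    ∀ (u : List Int) (v : List Int) (ms rd b : Int), pvInv nums ms rd b →
      (pvSc nums b = pvN nums → (-1 : Int) ≤ b) →
      (∀ d ∈ u, pvSc nums d = pvN nums → (-1 : Int) ≤ d) →
      (∀ d ∈ v, pvSc nums d ≠ pvN nums) →
      ((u ++ (-1) :: v).foldl (pvStepA nums) (ms, rd)).2 = (-1 : Int) ∧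
      (u ++ (-1) :: v).foldl (pvStepB nums) b = (-1 : Int) := by
  intro u
  induction u with
  | nil =>
      intro v ms rd b h hb _ hv
      obtain ⟨hA, hB⟩ := step_neg_one nums ms rd b h hb
      simp only [List.nil_append, List.foldl_cons, hA, hB]
      rw [runA_nofull nums v _ hv, runB_nofull nums v hv]
      exact ⟨rfl, rfl⟩
  | cons x u' ih =>
      intro v ms rd b h hb hu hv
      simp only [List.cons_append, List.foldl_cons]
      have h' := inv_step nums ms rd b x h
      have hmain := ih v (pvStepA nums (ms, rd) x).1 (pvStepA nums (ms, rd) x).2 (pvStepB nums b x)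
        h' ?_ (fun d hd => hu d (List.mem_cons_of_mem _ hd)) hv
      · simpa using hmain
      · intro hfull
        have hcase : pvStepB nums b x = b ∨ pvStepB nums b x = x := by
          unfold pvStepB; split_ifs
          · exact Or.inr rfl
          · exact Or.inl rfl
        rcases hcase with h2 | h2 <;> rw [h2] at hfull ⊢
        · exact hb hfull
        · exact hu x List.mem_cons_self hfull

-- ---- after a full-score divisor other than -1, A's result is never -1 ----
theorem runA_after_full (nums : List Int) (L : Int) (v : List Int) (ms rd b : Int)
    (h : pvInv nums ms rd b) (hL : pvSc nums L = pvN nums) (hLne : L ≠ -1)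
    (hv : ∀ d ∈ v, pvSc nums d ≠ pvN nums) :
    ((L :: v).foldl (pvStepA nums) (ms, rd)).2 ≠ -1 := by
  obtain ⟨h1, h2, h3⟩ := h
  have hbN := pvSc_le nums b
  simp only [List.foldl_cons]
  have hstep : ∃ rd', (pvStepA nums (ms, rd) L = (pvN nums, rd')) ∧ rd' ≠ -1 := by
    by_cases c1 : pvSc nums L > ms
    · exact ⟨L, by unfold pvStepA; dsimp only; rw [if_pos c1, hL], hLne⟩
    · have c2 : pvSc nums L = ms := by omega
      by_cases c3 : rd = -1 ∨ L < rd
      · refine ⟨L, ?_, hLne⟩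
        unfold pvStepA; dsimp only
        rw [if_neg c1, if_pos c2, if_pos c3, show ms = pvN nums from by omega]
      · refine ⟨rd, ?_, by omega⟩
        unfold pvStepA; dsimp only
        rw [if_neg c1, if_pos c2, if_neg c3, show ms = pvN nums from by omega]
  obtain ⟨rd', heq, hne⟩ := hstep
  rw [heq, runA_nofull nums v rd' hv]
  exact hne

-- ---- split a list at the last element kept by a filter ----
theorem filter_getLast?_split {α : Type} (p : α → Bool) (xs : List α) (a : α)
    (h : (xs.filter p).getLast? = some a) :
    ∃ u v, xs = u ++ a :: v ∧ p a = true ∧ v.filter p = [] := by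
  induction xs using List.reverseRecOn with
  | nil => simp at h
  | append_singleton xs x ih =>
      by_cases hx : p x = true
      · rw [List.filter_append, List.filter_cons, if_pos hx, List.filter_nil,
          List.getLast?_concat] at h
        obtain rfl : x = a := by simpa using h
        exact ⟨xs, [], rfl, hx, rfl⟩
      · rw [List.filter_append, List.filter_cons, if_neg hx, List.filter_nil, List.append_nil] at h
        obtain ⟨u, v, rfl, hpa, hv⟩ := ih h
        exact ⟨u, v ++ [x], by simp, hpa, by rw [List.filter_append, hv]; simp [hx]⟩

-- the initial step of A
theorem stepA_init (nums : List Int) (d : Int) :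
    pvStepA nums ((-1 : Int), (-1 : Int)) d = (pvSc nums d, d) := by
  have := pvSc_nonneg nums d
  unfold pvStepA; dsimp only
  split_ifs with h1 h2 h3
  · rfl
  · exfalso; omega
  · exfalso; omega
  · exfalso; omega

-- ===== VERDICT (by name: the statement is the Claim_ definition above) =====
theorem maxDivisibilityScore_spec : Claim_unchanged_maxDivisibilityScore := by
  unfold Claim_unchanged_maxDivisibilityScore
  intro nums divisors hdom hpre
  unfold Spec_maxDivisibilityScore
  intro hD
  rw [portA_eq, portB_eq nums divisors hpre]
  cases divisors with
  | nil => rfl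
  | cons h t =>
      dsimp only
      simp only [List.foldl_cons, stepA_init]
      have hinv := inv_run nums t (pvSc nums h) h h ⟨rfl, rfl, Or.inl rfl⟩
      obtain ⟨i1, i2, i3⟩ := hinv
      rcases i3 with hsync | ⟨hBneg, hrd⟩
      · exact hsync
      · exfalso; apply hD
        have hBsc := pvSc_neg_one nums
        have hmem : (-1 : Int) ∈ h :: t := by
          rcases runB_mem nums t h with h' | h'
          · rw [hBneg] at h'; rw [← h']; exact List.mem_cons_self
          · rw [hBneg] at h'; exact List.mem_cons_of_mem _ h'
        have hgeS : ∀ d ∈ h :: t, pvSc nums d = pvN nums → (-1 : Int) ≤ d := by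
          intro d hd hsd
          have hch := runB_isMax nums t h d
            (by rcases List.mem_cons.mp hd with h' | h'
                · exact Or.inl h'
                · exact Or.inr h')
          rw [hBneg] at hch
          rcases hch with hlt | ⟨heq, hle⟩ <;> omega
        have hmemf : (-1 : Int) ∈ (h :: t).filter (fun d => decide (∀ n ∈ nums, d ∣ n)) :=
          List.mem_filter.mpr ⟨hmem, (pred_iff nums (-1)).mpr hBsc⟩
        refine ⟨List.min?_eq_some_iff.mpr ⟨hmemf, ?_⟩, ?_⟩
        · intro b hb
          obtain ⟨hb1, hb2⟩ := List.mem_filter.mp hb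
          exact hgeS b hb1 ((pred_iff nums b).mp hb2)
        · intro hlast
          obtain ⟨u, v, hsplit, hpa, hvnil⟩ := filter_getLast?_split _ _ _ hlast
          have hvfull := nofull_of_filter_nil nums v hvnil
          cases u with
          | nil =>
              simp only [List.nil_append, List.cons.injEq] at hsplit
              obtain ⟨hh, ht⟩ := hsplit
              rw [hh, hBsc] at hrd
              rw [ht, runA_nofull nums v (-1) hvfull] at hrd
              simp at hrd
          | cons x u' =>
              simp only [List.cons_append, List.cons.injEq] at hsplit
              obtain ⟨hh, ht⟩ := hsplit
              have hb0 : pvSc nums h = pvN nums → (-1 : Int) ≤ h := hgeS h List.mem_cons_self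
              have hu : ∀ d ∈ u', pvSc nums d = pvN nums → (-1 : Int) ≤ d := by
                intro d hd
                refine hgeS d ?_
                rw [ht]
                exact List.mem_cons_of_mem _ (List.mem_append_left _ hd)
              have hmain := run_sync nums u' v (pvSc nums h) h h ⟨rfl, rfl, Or.inl rfl⟩ hb0 hu hvfull
              rw [ht] at hrd
              omega

theorem maxDivisibilityScore_changed : Claim_changed_maxDivisibilityScore := by
  unfold Claim_changed_maxDivisibilityScore; decide

theorem maxDivisibilityScore_tight : Claim_exact_maxDivisibilityScore := by
  unfold Claim_exact_maxDivisibilityScore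
  intro nums divisors hdom hpre hD
  unfold D_maxDivisibilityScore at hD
  obtain ⟨hmin, hlast⟩ := hD
  rw [List.min?_eq_some_iff] at hmin
  obtain ⟨hmemf, hminle⟩ := hmin
  rw [portA_eq, portB_eq nums divisors hpre]
  cases divisors with
  | nil => simp at hmemf
  | cons h t =>
      dsimp only
      simp only [List.foldl_cons, stepA_init]
      have hmem : (-1 : Int) ∈ h :: t := (List.mem_filter.mp hmemf).1
      have hgeS : ∀ d ∈ h :: t, pvSc nums d = pvN nums → (-1 : Int) ≤ d := by
        intro d hd hsc
        exact hminle d (List.mem_filter.mpr ⟨hd, (pred_iff nums d).mpr hsc⟩)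
      have hinv := inv_run nums t (pvSc nums h) h h ⟨rfl, rfl, Or.inl rfl⟩
      obtain ⟨i1, i2, i3⟩ := hinv
      rcases i3 with hsync | ⟨hBneg, hrd⟩
      · -- synced states would force both results to be -1, contradicting D_'s last-full clause
        exfalso
        have hBsc := pvSc_neg_one nums
        have hBle := pvSc_le nums (t.foldl (pvStepB nums) h)
        have hch := runB_isMax nums t h (-1)
          (by rcases List.mem_cons.mp hmem with h' | h'
              · exact Or.inl h'
              · exact Or.inr h')
        have hBeq : t.foldl (pvStepB nums) h = -1 := by
          rcases hch with hlt | ⟨heq, hle⟩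
          · omega
          · have hscB : pvSc nums (t.foldl (pvStepB nums) h) = pvN nums := by omega
            have hBmem : t.foldl (pvStepB nums) h ∈ h :: t := by
              rcases runB_mem nums t h with h' | h'
              · rw [h']; exact List.mem_cons_self
              · exact List.mem_cons_of_mem _ h'
            have := hgeS _ hBmem hscB
            omega
        have hA : (t.foldl (pvStepA nums) (pvSc nums h, h)).2 = -1 := by rw [hsync, hBeq]
        obtain ⟨L, hLlast⟩ : ∃ L, ((h :: t).filter (fun d => decide (∀ n ∈ nums, d ∣ n))).getLast? = some L := by
          cases hf : ((h :: t).filter (fun d => decide (∀ n ∈ nums, d ∣ n))).getLast? with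
          | none =>
              rw [List.getLast?_eq_none_iff] at hf
              rw [hf] at hmemf; simp at hmemf
          | some L => exact ⟨L, rfl⟩
        have hLne : L ≠ -1 := fun hc => hlast (by rw [← hc]; exact hLlast)
        obtain ⟨u, v, hsplit, hpL, hvnil⟩ := filter_getLast?_split _ _ _ hLlast
        have hLsc : pvSc nums L = pvN nums := (pred_iff nums L).mp hpL
        have hvfull := nofull_of_filter_nil nums v hvnil
        cases u with
        | nil =>
            simp only [List.nil_append, List.cons.injEq] at hsplit
            obtain ⟨hh, ht⟩ := hsplit
            rw [hh, hLsc, ht, runA_nofull nums v L hvfull] at hA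
            simp at hA
            exact hLne hA
        | cons x u' =>
            simp only [List.cons_append, List.cons.injEq] at hsplit
            obtain ⟨hh, ht⟩ := hsplit
            have hinv' := inv_run nums u' (pvSc nums h) h h ⟨rfl, rfl, Or.inl rfl⟩
            have hafter := runA_after_full nums L v
              (u'.foldl (pvStepA nums) (pvSc nums h, h)).1
              (u'.foldl (pvStepA nums) (pvSc nums h, h)).2
              (u'.foldl (pvStepB nums) h) hinv' hLsc hLne hvfull
            rw [ht, List.foldl_append] at hA
            simp only [Prod.mk.eta] at hafter
            exact hafter hA
      · rw [hBneg]; omega
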